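/-
  SEGMENT F5 OF `start_decoder` (0x1155c7–0x115712: `floor1_multiplier`, `rangebits`, `Xlist[0]`, `Xlist[1]`, `values = 2`, the
  loops 4007 / 4009 that read `Xlist[values++] = get_bits(f, rangebits)`; stb_vorbis_fixed.c 4002–4011 in the numbering of
  c/LABELS_f.txt; 67 instructions, 3 `get_bits` call sites, 11 check sites, two nested loops) SPLIT AT THE THREE RETURNS OF get_bits
  AND THE TWO LOOP HEADS (all five are existing labels: NO new label): the assertions at the cuts, the claims of the six children,
  the lemmas that carry the assertions (on top of Vorbis/Spec/StartDecoderFloor.lean), and the composition `SegF5.of_parts`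
  (pure logic: `ReachVia.trans`, two nested `ReachVia.loop`; no machine step). ALL SIX CHILDREN ARE PROVED
  (farm/worked/start_decoder.F5a … .F5f): every cut assertion has been used on both sides by a checked proof.

      .F5a  0x1155c7–0x1155cf, returns into 0x1155d4 (cut216)   `get_bits(f, 2)`
                                                                 exit: AtF5b (`In5` at cut216 ∧ rax < 4)
      .F5b  0x1155d4–0x1155f3, returns into 0x1155f8 (cut217)   `floor1_multiplier = al + 1` (checked byte store), `get_bits(f, 4)`
                                                                 exit: AtF5c (`In5` at cut217 ∧ FL7 ∧ rax < 16)
      .F5c  0x1155f8–0x11565f, jumps to 0x1156e6 (cut220)       `rangebits = al`, `Xlist[0] = 0`, `Xlist[1] = 1 << rangebits`,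
                                                                 `values = 2` (four checked stores), `j = 0` (r13d := Z24)
                                                                 exit: F5Outer … 0
      .F5d  0x1156e6–0x115712 (head of loop 4007, cut220 = loop22)   `j < partitions`? no: 0x115714 (cut221 = pc_F6); yes:
                                                                 `c = pcl[j]` spilled to `[R+38H]`, `k = 0` (r15d := Z24), to 0x1156c8
                                                                 exits: AtF6, F5Inner … j c d 0
      .F5e  0x1156c8–0x1156e2 + 0x115664–0x11567a (head of loop 4009, cut219 = loop21)   `k < class_dimensions[c]`? no: `++j`, falls
                                                                 into 0x1156e6; yes: `get_bits(f, rangebits)`, returns into 0x11567f (cut218)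
                                                                 exits: F5Outer … (j+1), F5After … j c d k
      .F5f  0x11567f–0x1156c4, falls into 0x1156c8 (cut219)     the result spilled to `[R+30H]`, `Xlist[values] = ax` (checked word
                                                                 store), `++values`, `++k`
                                                                 exit: F5Inner … j c d (k+1)

  WHAT IS LIVE AT EACH CUT (read off c/vorbis_f.dis 1155c7 … 115714): rsp, rbp (= f: `mov rdi, rbp` before every get_bits),
  rbx (= g(i), the element: every access is `[rbx + …]`) at every cut; and
      0x1155d4 (cut216)  eax (`lea r12d, [rax+1]`): get_bits(f, 2) < 4.            r12 – r15 dead.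
      0x1155f8 (cut217)  eax (`mov r12d, eax`): get_bits(f, 4) < 16.               r12 – r15 dead.
      0x1156e6 (cut220)  r13d = j (`cmp eax, r13d` 0x1156f1; `movsxd r12, r13d` 0x1156f6).        r12 r14 r15, `[R+30H]`, `[R+38H]` dead.
      0x1156c8 (cut219)  r13d = j (`add r13d, 1` 0x1156e2), r15d = k (`cmp eax, r15d` 0x1156dd), dword `[R+38H]` = c = pcl[j]
                         (`movsxd r12, dword [rsp+0x38]`).                          r12 r14, `[R+30H]` dead.
      0x11567f (cut218)  the same, and eax (`mov [rsp+0x30], eax`): get_bits(f, rangebits) < 2^rangebits.   r12 r14 dead.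
  The compiler's literal-0 slot Z24 (`dword [R+24H] = 0`, `Mid.consts.z24`) is read at 0x11565a (j := 0) and 0x11570d (k := 0).

  THE GHOSTS OF THE LOOPS. The measures of `ReachVia.loop` are functions of the STATE, so the bounds are carried as ghost VALUES with
  equations: `P` = `partitions` (byte `[G]`), `c` = `pcl[j]`, `d` = `class_dimensions[c]`. The outer measure is `P − r13`, the inner
  `d − r15`. The children that introduce a ghost (F5c: `P`; F5d: `c`, `d`) take its value from THEIR entry state.

  THE LEMMAS (for the children's proofs; all pure logic):
      In5.of_body                      the entry `BodyF5` as `In5` with the class counter `min n 16`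
      In5.lt / .geo / .site            `i < floor_count`; the geometry (`Floor.Geo`, 19 facts for `omega`); a check site in the element
      In5.keep                         THE FRAME LEMMA OF THE SEGMENT = `Floor.carry` + `Floor.floor5_carry` (element part ⊆ `[G+152H, G+63CH)`)
      In5.dimSum_le / .class_dim       `Σ ≤ 8·j` (so `values ≤ 250`); `pcl[j] ≤ 15`, `1 ≤ class_dimensions[pcl j] ≤ 8`
      In5.elem_same, F5.vals_same, F5Part.keep_same, F5Inner.keep_same     a piece that leaves the element alone (call returns, spills)
      F5Inner.next_outer               the exit of loop 4009 (`k = d`, `++j`): `Floor1.dimSum_succ`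
      F5After.next_inner               one round of loop 4009 (`Xlist[m]`, `++values`, `++k`): `XLUpTo.step`
      AtF5c.first_outer                the entry of loop 4007 (`XLUpTo.two`)

  THE BOUND `n ≤ 16`. `Floor5.classes = ClassesUpTo … n` with `n` unbounded cannot be carried over the stores of this segment (for a
  class index `≥ 16` the "class tables" alias `subclass_books` / `Xlist`); `In5` therefore carries `n_le : n ≤ 16`, and F5a passes from
  the entry's `n` to `min n 16` (`AtF5` / `AtF6` quantify `n` existentially; `mc ≤ 15 < 16` keeps `mc < n`). `Floor5` is unchanged.
-/
import Vorbis.Spec.StartDecoderFloor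

namespace Vorbis.Spec.StartDecoder
open X86 X86.User Asan

/-! ### The assertions at the cuts -/

/-- **Inside segment F5**: `BodyF5` with the program counter as a parameter — the common part of the assertion at every cut point of
the segment (the loop invariant of 3966, `rbx = g(i)`, FL3(i) – FL6(i)) — and the bound `n ≤ 16` of the class counter. -/
structure In5 (u₀ : State) (g : Ghost) (i : Nat) (A5 : Arena) (A : Arena × List Obj) (mc : Int) (n : Nat) (pc : Word)
    (s : State) : Prop where
  /-- the invariant of loop 3966 at `pc` (Frame, Hand, `Mid g 5 5 6`, rbp = f, `[R+18H] = i`, the finished floors, `[R+28H]`) -/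
  loop : FloorLoop u₀ g pc i A5 A s
  /-- rbx = g(i) = floor_config + 1596·i (set in F2, callee-saved, never written in F4 / F5; read by every access of the segment) -/
  rbx : s.reg .rbx = addr (floorAt g s.mem i)
  /-- FL3(i) – FL6(i): the class tables of the element (written by F4; F5 writes `[G+152H, G+346H)` and `[G+634H, G+63CH)` only) -/
  cur : Floor5 g s.mem i mc n
  /-- the class counter is at most 16: `ClassesUpTo … n` speaks of the sixteen rows of the class tables only -/
  n_le : n ≤ 16

/-- **The entry assertion as `In5`**, with the class counter cut down to 16 (`AtF5` / `AtF6` quantify it existentially;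
`max_class ≤ 15 < 16` keeps `mc < n`). -/
theorem In5.of_body {u₀ : State} {g : Ghost} {i : Nat} {A5 : Arena} {A : Arena × List Obj} {mc : Int} {n : Nat} {v : State}
    (h : BodyF5 u₀ g i A5 A mc n v) : In5 u₀ g i A5 A mc (min n 16) pc_F5 v := by
  refine ⟨h.loop, h.rbx, ⟨h.cur.base, ?_, ?_⟩, Nat.min_le_right _ _⟩
  · intro c hc
    exact h.cur.classes c (by omega)
  · have h1 := h.cur.mc_lt
    have h2 := h.cur.base.mc_hi
    omega

/-- `i < floor_count`: the element under construction is one of the floor block (`Floor4.lt`). -/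
theorem In5.lt {u₀ : State} {g : Ghost} {i : Nat} {A5 : Arena} {A : Arena × List Obj} {mc : Int} {n : Nat} {pc : Word}
    {v : State} (h : In5 u₀ g i A5 A mc n pc v) : (i : Int) < stb_vorbis.floor_count v.mem g.f :=
  h.cur.base.lt

/-- **The geometry of the segment as arithmetic** (`Floor.Geo`: nineteen facts for `omega`): get it ONCE per proof, before the walk. -/
theorem In5.geo {u₀ : State} {g : Ghost} {i : Nat} {A5 : Arena} {A : Arena × List Obj} {mc : Int} {n : Nat} {pc : Word}
    {v : State} (h : In5 u₀ g i A5 A mc n pc v) : Floor.Geo g A v.mem i :=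
  Floor.geo h.loop h.lt

/-- **Every check site of the segment**: `k` bytes at offset `off` of the element `g(i)` lie inside ONE live block (the floor
block of FL2). Memory-independent: stated once, at the state the piece starts from. -/
theorem In5.site {u₀ : State} {g : Ghost} {i : Nat} {A5 : Arena} {A : Arena × List Obj} {mc : Int} {n : Nat} {pc : Word}
    {v : State} (h : In5 u₀ g i A5 A mc n pc v) (off k : Nat) (hk : 1 ≤ k) (ho : off + k ≤ Off.sizeof.Floor) :
    Site (Live (stackObjs g.frames' ++ A.2)) (floorAt g v.mem i + off) k :=
  Floor.site h.loop h.lt off k hk ho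

/-- **THE FRAME LEMMA OF THE SEGMENT**: the assertion `In5` is kept by any piece of code that writes only `Floor.Win` windows whose
part of the element lies in `[G + 152H, G + 1596)` (`Xlist`, `floor1_multiplier`, `rangebits`, `values`; `lo = hi` for a callee),
relative to the state `v` the piece starts from, leaves the shadow alone and ends with `Bits` (the reader's post, or
`Bits.frame_fields`), at a state with the same `rsp`, `rbp`, `rbx`. = `Floor.carry` + `Floor.floor5_carry`. -/
theorem In5.keep {u₀ : State} {g : Ghost} {i : Nat} {A5 : Arena} {A : Arena × List Obj} {mc : Int} {n : Nat} {pc : Word}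
    {v : State} (h : In5 u₀ g i A5 A mc n pc v) {s : State} {pc' : Word} {ws : List Span} {lo hi : Nat}
    (hrip : s.rip = pc') (hrsp : s.reg .rsp = addr g.R) (hrbp : s.reg .rbp = addr g.f)
    (hrbx : s.reg .rbx = addr (floorAt g v.mem i)) (hinv : abiInv s) (hcode : CodeOK u₀ s.mem)
    (hsame : Mem.SameExcept ws v.mem s.mem) (hw : ∀ w, w ∈ ws → Floor.Win g (floorAt g v.mem i) lo hi w)
    (hlo : 0x152 ≤ lo) (hlh : lo ≤ hi) (hhi : hi ≤ 1596)
    (hun : ShadowUntouched v.mem s.mem) (hbits : Bits (g.Blk A) g.len s.mem g.f) :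
    In5 u₀ g i A5 A mc n pc' s := by
  have hloop := Floor.carry h.loop h.lt hhi hrip hrsp hrbp hinv hcode hsame hw hun hbits
  have hcur := Floor.floor5_carry h.geo h.cur h.n_le hlo hlh hhi hsame hw
  obtain ⟨eG, _, _, _⟩ := Floor.fields_same h.geo hsame hw hhi
  exact ⟨hloop, by rw [eG]; exact hrbx, hcur, h.n_le⟩

/-- **cut216 = 0x1155d4, the return of `get_bits(f, 2)`** (call 0x1155cf): the result is below 4 (`lea r12d, [rax+1]` makes
`floor1_multiplier ∈ [1, 4]`: FL7). -/
structure AtF5b (u₀ : State) (g : Ghost) (i : Nat) (A5 : Arena) (A : Arena × List Obj) (mc : Int) (n : Nat) (v : State) :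
    Prop where
  in5 : In5 u₀ g i A5 A mc n Vorbis.L.start_decoder.cut216 v
  /-- the FULL register: `GetBitsResult 2 rax` of get_bits' post; read by `lea r12d, [rax+1]` 0x1155d4 -/
  rax : (v.reg .rax).toNat < 4

/-- **cut217 = 0x1155f8, the return of `get_bits(f, 4)`** (call 0x1155f3): FL7 is established (store 0x1155e4), the result is
below 16 (it becomes `rangebits`: store 0x115607, shift count 0x11562b). -/
structure AtF5c (u₀ : State) (g : Ghost) (i : Nat) (A5 : Arena) (A : Arena × List Obj) (mc : Int) (n : Nat) (v : State) :
    Prop where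
  in5 : In5 u₀ g i A5 A mc n Vorbis.L.start_decoder.cut217 v
  /-- FL7(i): `1 ≤ floor1_multiplier ≤ 4` (byte store 0x1155e4 of `get_bits(f, 2) + 1`; read by `Floor6.FL7` at the exit) -/
  FL7 : 1 ≤ Floor1.floor1_multiplier v.mem (floorAt g v.mem i) ∧ Floor1.floor1_multiplier v.mem (floorAt g v.mem i) ≤ 4
  /-- the FULL register: `GetBitsResult 4 rax`; read by `mov r12d, eax` 0x1155f8 -/
  rax : (v.reg .rax).toNat < 16

/-- **What the three assertions inside loop 4007 share**: `In5` at `pc`, FL7, `r13d = j`, and the ghost `P = partitions`. -/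
structure F5Part (u₀ : State) (g : Ghost) (i : Nat) (A5 : Arena) (A : Arena × List Obj) (mc : Int) (n P j : Nat) (pc : Word)
    (v : State) : Prop where
  in5 : In5 u₀ g i A5 A mc n pc v
  /-- FL7(i) (store 0x1155e4; nothing in the loops writes `[G+634H]`) -/
  FL7 : 1 ≤ Floor1.floor1_multiplier v.mem (floorAt g v.mem i) ∧ Floor1.floor1_multiplier v.mem (floorAt g v.mem i) ≤ 4
  /-- r13d = j (0x11565a `mov r13d, [rsp+0x24]` = Z24 = 0; `add r13d, 1` 0x1156e2; read 0x1156f1, 0x1156f6) -/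
  r13 : v.reg .r13 = addr j
  /-- the ghost `P`: the byte `partitions` (`[G]`, read 0x1156ee; never written in the segment; `≤ 31` by `Floor4.FL4`) -/
  parts : Floor1.partitions v.mem (floorAt g v.mem i) = P

/-- **cut220 = loop22 = 0x1156e6, the head of loop 4007** (`for (j = 0; j < g->partitions; ++j)`): `j ≤ partitions`,
`values = 2 + Σ_{j' < j} class_dimensions[pcl[j']]`, XL up to `values`. Measure: `P − j`. -/
structure F5Outer (u₀ : State) (g : Ghost) (i : Nat) (A5 : Arena) (A : Arena × List Obj) (mc : Int) (n P j : Nat) (v : State) :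
    Prop where
  part : F5Part u₀ g i A5 A mc n P j Vorbis.L.start_decoder.cut220 v
  j_le : j ≤ P
  /-- `values` (dword `[G+638H]`: store 0x115650 `= 2`, store 0x1156bd `+ 1`; read 0x11568f) -/
  values : Floor1.values v.mem (floorAt g v.mem i) = ((2 + Floor1.dimSum v.mem (floorAt g v.mem i) j : Nat) : Int)
  /-- XL up to `values` (`XLUpTo.two` after the stores 0x115607, 0x11561a, 0x11563c; `XLUpTo.step` in F5f) -/
  xl : XLUpTo v.mem (floorAt g v.mem i) (2 + Floor1.dimSum v.mem (floorAt g v.mem i) j)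

/-- **Inside loop 4009** (`for (k = 0; k < g->class_dimensions[c]; ++k)`), at `pc` = cut219 (the head) or cut218 (the return of
get_bits): partition `j < P`, its class `c = pcl[j] ≤ 15` in the spill slot `[R+38H]`, `d = class_dimensions[c] ≤ 8`, `r15d = k ≤ d`,
`values = 2 + Σ_{j' < j} … + k`, XL up to `values`. -/
structure F5Inner (u₀ : State) (g : Ghost) (i : Nat) (A5 : Arena) (A : Arena × List Obj) (mc : Int) (n P j c d k : Nat) (pc : Word)
    (v : State) : Prop where
  part : F5Part u₀ g i A5 A mc n P j pc v
  /-- `jle` 0x1156f4 not taken -/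
  j_lt : j < P
  /-- dword `[R+38H]` = c (store 0x115709 of the zero-extended byte; read 0x1156c8 `movsxd r12, dword [rsp+0x38]`) -/
  slot_c : slot g v.mem 0x38 = c
  /-- c = partition_class_list[j] (byte `[G+1+j]`, load 0x115703) -/
  pcl : Floor1.partition_class_list v.mem (floorAt g v.mem i) j = c
  /-- `c ≤ 15` (`Floor4.pcl`): the byte `[G+21H+c]` is a class-table entry -/
  c_le : c ≤ 15
  /-- d = class_dimensions[c] (byte `[G+21H+c]`, load 0x1156d7) -/
  dim : Floor1.class_dimensions v.mem (floorAt g v.mem i) c = d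
  /-- `d ≤ 8` (FL6 of class `c ≤ max_class < n`: `Floor5.classes`) -/
  d_le : d ≤ 8
  /-- r15d = k (0x11570d `mov r15d, [rsp+0x24]` = Z24 = 0; `add r15d, 1` 0x1156c4; read 0x1156dd) -/
  r15 : v.reg .r15 = addr k
  k_le : k ≤ d
  /-- `values` (dword `[G+638H]`) -/
  values : Floor1.values v.mem (floorAt g v.mem i) = ((2 + Floor1.dimSum v.mem (floorAt g v.mem i) j + k : Nat) : Int)
  /-- XL up to `values` -/
  xl : XLUpTo v.mem (floorAt g v.mem i) (2 + Floor1.dimSum v.mem (floorAt g v.mem i) j + k)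

/-- **cut218 = 0x11567f, the return of `get_bits(f, rangebits)`** (call 0x11567a): the facts of loop 4009 with `k < d` (`jg` 0x1156e0
taken), and the result below `2 ^ rangebits` (`rangebits ≤ 15`: `XLUpTo.rb`; it becomes `Xlist[values]`). -/
structure F5After (u₀ : State) (g : Ghost) (i : Nat) (A5 : Arena) (A : Arena × List Obj) (mc : Int) (n P j c d k : Nat)
    (v : State) : Prop where
  inner : F5Inner u₀ g i A5 A mc n P j c d k Vorbis.L.start_decoder.cut218 v
  k_lt : k < d
  /-- the FULL register: `GetBitsResult rangebits rax`; read by `mov [rsp+0x30], eax` 0x11567f -/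
  rax : (v.reg .rax).toNat < 2 ^ Floor1.rangebits v.mem (floorAt g v.mem i)

/-! ### The assertions over a piece that leaves the whole element alone (a call return, a spill)

After `get_bits` returns, after a check routine's push, after a store into a spill slot, the 1596 bytes of the element read the
same: every accessor of `Floor1` is carried by the owners' `Floor1.same_*` lemmas. The pieces F5d, F5e (and the call halves of F5a,
F5b) are of this kind; F5c and F5f WRITE the element and use `Floor.elem_below` / `Floor.elem_above` with their own windows. -/

/-- **The Σ of FL8 is bounded**: `Σ_{j' < j} class_dimensions[pcl[j']] ≤ 8·j` for `j ≤ partitions` (every class in use is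
`≤ max_class < n`, and FL6 of a class bounds its dimension by 8). -/
theorem In5.dimSum_le {u₀ : State} {g : Ghost} {i : Nat} {A5 : Arena} {A : Arena × List Obj} {mc : Int} {n : Nat} {pc : Word}
    {v : State} (h : In5 u₀ g i A5 A mc n pc v) {j : Nat} (hj : j ≤ Floor1.partitions v.mem (floorAt g v.mem i)) :
    Floor1.dimSum v.mem (floorAt g v.mem i) j ≤ 8 * j := by
  unfold Floor1.dimSum
  apply sumTo_le_mul
  intro j' hj'
  have hp := h.cur.base.pcl j' (by omega)
  have hlt := h.cur.mc_lt
  exact (h.cur.classes (Floor1.partition_class_list v.mem (floorAt g v.mem i) j') (by omega)).dim.2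

/-- **The class of a partition in use**: `c = pcl[j] ≤ 15` and `1 ≤ class_dimensions[c] ≤ 8` (`Floor4.pcl`, FL6 of `c`). -/
theorem In5.class_dim {u₀ : State} {g : Ghost} {i : Nat} {A5 : Arena} {A : Arena × List Obj} {mc : Int} {n : Nat} {pc : Word}
    {v : State} (h : In5 u₀ g i A5 A mc n pc v) {j : Nat} (hj : j < Floor1.partitions v.mem (floorAt g v.mem i)) :
    Floor1.partition_class_list v.mem (floorAt g v.mem i) j ≤ 15 ∧
    1 ≤ Floor1.class_dimensions v.mem (floorAt g v.mem i) (Floor1.partition_class_list v.mem (floorAt g v.mem i) j) ∧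
    Floor1.class_dimensions v.mem (floorAt g v.mem i) (Floor1.partition_class_list v.mem (floorAt g v.mem i) j) ≤ 8 := by
  have hp := h.cur.base.pcl j hj
  have hlt := h.cur.mc_lt
  have hc := (h.cur.classes (Floor1.partition_class_list v.mem (floorAt g v.mem i) j) (by omega)).dim
  exact ⟨hp.1, hc.1, hc.2⟩

/-- **The whole element reads the same** after a piece whose windows contain no part of it (`Floor.Win … 1596 1596`), and it does
not wrap: the premises `hs`, `hg` of the owners' `Floor1.same_*` lemmas. -/
theorem In5.elem_same {u₀ : State} {g : Ghost} {i : Nat} {A5 : Arena} {A : Arena × List Obj} {mc : Int} {n : Nat} {pc : Word}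
    {v : State} (h : In5 u₀ g i A5 A mc n pc v) {mem' : Mem} {ws : List Span} (hsame : Mem.SameExcept ws v.mem mem')
    (hw : ∀ w, w ∈ ws → Floor.Win g (floorAt g v.mem i) 1596 1596 w) :
    (Block.mk (floorAt g v.mem i) Off.sizeof.Floor).Same v.mem mem' ∧ floorAt g v.mem i + Off.sizeof.Floor ≤ 2 ^ 64 := by
  have he := Floor.elem_below h.geo hsame (fun w hw' => (hw w hw').winT (i := i)) (Nat.le_refl _) (Nat.le_refl _)
  obtain ⟨r8, rlo, rhi, ra, flo, fhi, fstack, farena, flog, fc1, fc64, ilt, gdef, blo, bhi, btext, bstack, bdata, blog⟩ := h.geo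
  refine ⟨?_, ?_⟩
  · simp only [vblock, voff]
    exact he
  · simp only [voff]
    omega

/-- **`values` and XL up to it over `Same` of the element**, for a count `m ≤ 250` (every `Xlist[j]`, `j < m`, is inside `Xlist`). -/
theorem F5.vals_same {mem mem' : Mem} {G m : Nat} (hs : (Block.mk G Off.sizeof.Floor).Same mem mem')
    (hg : G + Off.sizeof.Floor ≤ 2 ^ 64) (h2 : 2 ≤ m) (hm : m ≤ 250) (hv : Floor1.values mem G = (m : Int))
    (hx : XLUpTo mem G m) : Floor1.values mem' G = (m : Int) ∧ XLUpTo mem' G m := by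
  refine ⟨?_, ?_⟩
  · rw [Floor1.same_values hs hg]
    exact hv
  · apply hx.of_eq h2 (Floor1.same_rangebits hs hg)
    intro j hj
    exact Floor1.same_Xlist hs hg j (by omega)

/-- **`F5Part` over a piece that leaves the element alone**: `In5` at the new state comes from `In5.keep`, the rest from `Same`;
the partition counter may have changed (`j'`: `add r13d, 1` in F5e). -/
theorem F5Part.keep_same {u₀ : State} {g : Ghost} {i : Nat} {A5 : Arena} {A : Arena × List Obj} {mc : Int} {n P j : Nat}
    {pc pc' : Word} {v s : State} (h : F5Part u₀ g i A5 A mc n P j pc v) (hin : In5 u₀ g i A5 A mc n pc' s)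
    (hs : (Block.mk (floorAt g v.mem i) Off.sizeof.Floor).Same v.mem s.mem)
    (hg : floorAt g v.mem i + Off.sizeof.Floor ≤ 2 ^ 64) (eG : floorAt g s.mem i = floorAt g v.mem i)
    {j' : Nat} (hr13 : s.reg .r13 = addr j') : F5Part u₀ g i A5 A mc n P j' pc' s := by
  refine ⟨hin, ?_, hr13, ?_⟩
  · rw [eG, Floor1.same_floor1_multiplier hs hg]
    exact h.FL7
  · rw [eG, Floor1.same_partitions hs hg]
    exact h.parts

/-- **The facts of loop 4009 over a piece that leaves the element alone** (F5e's call of get_bits, the pushes of the check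
routines): `F5Inner` at the new state, given `In5` there (`In5.keep`), `Same` of the element, the registers and the spill slot. -/
theorem F5Inner.keep_same {u₀ : State} {g : Ghost} {i : Nat} {A5 : Arena} {A : Arena × List Obj} {mc : Int} {n P j c d k : Nat}
    {pc pc' : Word} {v s : State} (h : F5Inner u₀ g i A5 A mc n P j c d k pc v) (hin : In5 u₀ g i A5 A mc n pc' s)
    (hs : (Block.mk (floorAt g v.mem i) Off.sizeof.Floor).Same v.mem s.mem)
    (hg : floorAt g v.mem i + Off.sizeof.Floor ≤ 2 ^ 64) (eG : floorAt g s.mem i = floorAt g v.mem i)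
    (hr13 : s.reg .r13 = addr j) (hr15 : s.reg .r15 = addr k) (hslot : slot g s.mem 0x38 = c) :
    F5Inner u₀ g i A5 A mc n P j c d k pc' s := by
  have hb := h.part.in5
  have hjP : j ≤ Floor1.partitions v.mem (floorAt g v.mem i) := by
    rw [h.part.parts]
    exact Nat.le_of_lt h.j_lt
  have hP : Floor1.partitions v.mem (floorAt g v.mem i) ≤ 31 := hb.cur.base.FL4
  have hsum := hb.dimSum_le hjP
  have hd := h.d_le
  have hk := h.k_le
  have hjlt := h.j_lt
  rw [← h.part.parts] at hjlt
  have hds : Floor1.dimSum s.mem (floorAt g v.mem i) j = Floor1.dimSum v.mem (floorAt g v.mem i) j :=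
    Floor1.same_dimSum hs hg j (by omega)
  obtain ⟨hv', hx'⟩ := F5.vals_same hs hg (by omega) (by omega) h.values h.xl
  refine ⟨h.part.keep_same hin hs hg eG hr13, h.j_lt, hslot, ?_, h.c_le, ?_, h.d_le, hr15, h.k_le, ?_, ?_⟩
  · rw [eG, Floor1.same_partition_class_list hs hg j (by omega)]
    exact h.pcl
  · rw [eG, Floor1.same_class_dimensions hs hg c (by have := h.c_le; omega)]
    exact h.dim
  · rw [eG, hds]
    exact hv'
  · rw [eG, hds]
    exact hx'

/-- **The exit of loop 4009** (`k ≥ d`, so `k = d`; `add r13d, 1`): the facts of loop 4009 give the head of loop 4007 with `j + 1`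
(`Floor1.dimSum_succ`: `Σ_{j' < j+1} = Σ_{j' < j} + class_dimensions[pcl[j]]`), over a piece that leaves the element alone. -/
theorem F5Inner.next_outer {u₀ : State} {g : Ghost} {i : Nat} {A5 : Arena} {A : Arena × List Obj} {mc : Int}
    {n P j c d k : Nat} {pc : Word} {v s : State} (h : F5Inner u₀ g i A5 A mc n P j c d k pc v) (hdk : d ≤ k)
    (hin : In5 u₀ g i A5 A mc n Vorbis.L.start_decoder.cut220 s)
    (hs : (Block.mk (floorAt g v.mem i) Off.sizeof.Floor).Same v.mem s.mem)
    (hg : floorAt g v.mem i + Off.sizeof.Floor ≤ 2 ^ 64) (eG : floorAt g s.mem i = floorAt g v.mem i)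
    (hr13 : s.reg .r13 = addr (j + 1)) : F5Outer u₀ g i A5 A mc n P (j + 1) s := by
  have hb := h.part.in5
  have hjP : j ≤ Floor1.partitions v.mem (floorAt g v.mem i) := by
    rw [h.part.parts]
    exact Nat.le_of_lt h.j_lt
  have hP : Floor1.partitions v.mem (floorAt g v.mem i) ≤ 31 := hb.cur.base.FL4
  have hsum := hb.dimSum_le hjP
  have hd := h.d_le
  have hk := h.k_le
  have hjlt := h.j_lt
  rw [← h.part.parts] at hjlt
  have hkd : k = d := by omega
  have hsucc : Floor1.dimSum v.mem (floorAt g v.mem i) (j + 1) = Floor1.dimSum v.mem (floorAt g v.mem i) j + k := by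
    rw [Floor1.dimSum_succ, h.pcl, h.dim, hkd]
  have hds : Floor1.dimSum s.mem (floorAt g v.mem i) (j + 1) = Floor1.dimSum v.mem (floorAt g v.mem i) (j + 1) :=
    Floor1.same_dimSum hs hg (j + 1) (by omega)
  obtain ⟨hv', hx'⟩ := F5.vals_same hs hg (by omega) (by omega) h.values h.xl
  refine ⟨h.part.keep_same hin hs hg eG hr13, h.j_lt, ?_, ?_⟩
  · rw [eG, hds, hsucc, hv']
    omega
  · rw [eG, hds, hsucc]
    have e : 2 + (Floor1.dimSum v.mem (floorAt g v.mem i) j + k) = 2 + Floor1.dimSum v.mem (floorAt g v.mem i) j + k := by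
      omega
    rw [e]
    exact hx'

/-- **One round of loop 4009** (`Xlist[values] = get_bits(f, rangebits)`, `++values`, `++k`): the facts at `cut218` give the head of
loop 4009 with `k + 1`, for a piece that wrote, of the element, only the word `Xlist[m]` and the dword `values` (`m` = the old
`values` = `2 + Σ_{j' < j} … + k ≤ 249`): the element reads the same below `Xlist[m]` (`hlow`) and from `Xlist[m+1]` up to `values`
(`hhigh`); the new entry is below `2 ^ rangebits` (`hx`); `values` was incremented (`hval`). `XLUpTo.step`. -/
theorem F5After.next_inner {u₀ : State} {g : Ghost} {i : Nat} {A5 : Arena} {A : Arena × List Obj} {mc : Int}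
    {n P j c d k : Nat} {v s : State} (h : F5After u₀ g i A5 A mc n P j c d k v)
    (hin : In5 u₀ g i A5 A mc n Vorbis.L.start_decoder.cut219 s)
    (eG : floorAt g s.mem i = floorAt g v.mem i) {m : Nat}
    (hm : m = 2 + Floor1.dimSum v.mem (floorAt g v.mem i) j + k)
    (hlow : Mem.EqOn (floorAt g v.mem i) (floorAt g v.mem i + 0x152 + 2 * m) v.mem s.mem)
    (hhigh : Mem.EqOn (floorAt g v.mem i + 0x154 + 2 * m) (floorAt g v.mem i + 0x638) v.mem s.mem)
    (hg : floorAt g v.mem i + 1596 ≤ 2 ^ 64)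
    (hx : Floor1.Xlist s.mem (floorAt g v.mem i) m < 2 ^ Floor1.rangebits v.mem (floorAt g v.mem i))
    (hval : Floor1.values s.mem (floorAt g v.mem i) = ((m + 1 : Nat) : Int))
    (hr13 : s.reg .r13 = addr j) (hr15 : s.reg .r15 = addr (k + 1)) (hslot : slot g s.mem 0x38 = c) :
    F5Inner u₀ g i A5 A mc n P j c d (k + 1) Vorbis.L.start_decoder.cut219 s := by
  have hi := h.inner
  have hb := hi.part.in5
  have hjlt := hi.j_lt
  rw [← hi.part.parts] at hjlt
  have hP : Floor1.partitions v.mem (floorAt g v.mem i) ≤ 31 := hb.cur.base.FL4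
  have hsum := hb.dimSum_le (Nat.le_of_lt hjlt)
  have hd := hi.d_le
  have hk := h.k_lt
  have hc := hi.c_le
  have hm249 : m ≤ 249 := by omega
  -- the accessors that read the same
  have epart : Floor1.partitions s.mem (floorAt g v.mem i) = Floor1.partitions v.mem (floorAt g v.mem i) := by
    simp only [vacc, voff]
    exact hlow.u8 _ (by omega) (by omega) (by omega)
  have epcl : ∀ j' : Nat, j' < 32 → Floor1.partition_class_list s.mem (floorAt g v.mem i) j'
      = Floor1.partition_class_list v.mem (floorAt g v.mem i) j' := by
    intro j' hj'
    simp only [vacc, voff]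
    exact hlow.u8 _ (by omega) (by omega) (by omega)
  have edim : ∀ c' : Nat, c' < 16 → Floor1.class_dimensions s.mem (floorAt g v.mem i) c'
      = Floor1.class_dimensions v.mem (floorAt g v.mem i) c' := by
    intro c' hc'
    simp only [vacc, voff]
    exact hlow.u8 _ (by omega) (by omega) (by omega)
  have emul : Floor1.floor1_multiplier s.mem (floorAt g v.mem i) = Floor1.floor1_multiplier v.mem (floorAt g v.mem i) := by
    simp only [vacc, voff]
    exact hhigh.u8 _ (by omega) (by omega) (by omega)
  have erb : Floor1.rangebits s.mem (floorAt g v.mem i) = Floor1.rangebits v.mem (floorAt g v.mem i) := by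
    simp only [vacc, voff]
    exact hhigh.u8 _ (by omega) (by omega) (by omega)
  have exl : ∀ j' : Nat, j' < m → Floor1.Xlist s.mem (floorAt g v.mem i) j' = Floor1.Xlist v.mem (floorAt g v.mem i) j' := by
    intro j' hj'
    simp only [vacc, voff]
    exact hlow.u16 _ (by omega) (by omega) (by omega)
  have hds : Floor1.dimSum s.mem (floorAt g v.mem i) j = Floor1.dimSum v.mem (floorAt g v.mem i) j := by
    apply Floor1.dimSum_congr
    · intro j' hj'
      exact epcl j' (by omega)
    · intro j' hj'
      have hp := hb.cur.base.pcl j' (by omega)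
      exact edim _ (by omega)
  have hxl : XLUpTo s.mem (floorAt g v.mem i) (m + 1) := by
    have hxl0 := hi.xl
    rw [← hm] at hxl0
    exact hxl0.step (by omega) erb exl hx
  refine ⟨⟨hin, ?_, hr13, ?_⟩, hi.j_lt, hslot, ?_, hi.c_le, ?_, hi.d_le, hr15, h.k_lt, ?_, ?_⟩
  · rw [eG, emul]
    exact hi.part.FL7
  · rw [eG, epart]
    exact hi.part.parts
  · rw [eG, epcl j (by omega)]
    exact hi.pcl
  · rw [eG, edim c (by omega)]
    exact hi.dim
  · rw [eG, hds, hval]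
    omega
  · rw [eG, hds]
    have e : 2 + Floor1.dimSum v.mem (floorAt g v.mem i) j + (k + 1) = m + 1 := by omega
    rw [e]
    exact hxl

/-- **The entry of loop 4007** (after the four stores `rangebits`, `Xlist[0] = 0`, `Xlist[1] = 1 << rangebits`, `values = 2`, and
`j = 0`): the head assertion with `j = 0` and `P` = the `partitions` of the state `v` at `cut217`, for a piece that wrote, of the
element, only `[G+152H, G+156H)`, the byte `[G+635H]` and `[G+638H, G+63CH)`: `partitions` (`hpar`) and `floor1_multiplier`
(`hmul`) read the same, the four new values are as stored. `XLUpTo.two`. -/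
theorem AtF5c.first_outer {u₀ : State} {g : Ghost} {i : Nat} {A5 : Arena} {A : Arena × List Obj} {mc : Int} {n : Nat}
    {v s : State} (h : AtF5c u₀ g i A5 A mc n v) (hin : In5 u₀ g i A5 A mc n Vorbis.L.start_decoder.cut220 s)
    (eG : floorAt g s.mem i = floorAt g v.mem i)
    (hpar : Floor1.partitions s.mem (floorAt g v.mem i) = Floor1.partitions v.mem (floorAt g v.mem i))
    (hmul : Floor1.floor1_multiplier s.mem (floorAt g v.mem i) = Floor1.floor1_multiplier v.mem (floorAt g v.mem i))
    (hrb : Floor1.rangebits s.mem (floorAt g v.mem i) ≤ 15)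
    (hx0 : Floor1.Xlist s.mem (floorAt g v.mem i) 0 = 0)
    (hx1 : Floor1.Xlist s.mem (floorAt g v.mem i) 1 = 2 ^ Floor1.rangebits s.mem (floorAt g v.mem i))
    (hval : Floor1.values s.mem (floorAt g v.mem i) = 2) (hr13 : s.reg .r13 = addr 0) :
    F5Outer u₀ g i A5 A mc n (Floor1.partitions v.mem (floorAt g v.mem i)) 0 s := by
  refine ⟨⟨hin, ?_, hr13, ?_⟩, Nat.zero_le _, ?_, ?_⟩
  · rw [eG, hmul]
    exact h.FL7
  · rw [eG, hpar]
  · rw [eG, Floor1.dimSum_zero, hval]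
    rfl
  · rw [eG, Floor1.dimSum_zero]
    exact XLUpTo.two hrb hx0 hx1

/-! ### The claims of the six children -/

/-- Segment F5a (0x1155c7 – 0x1155cf): `mov esi, 2 ; mov rdi, rbp ; call get_bits`, exit at its return `cut216`. The class counter
is cut down to `min n 16` here. -/
def SegF5a (Lay : Layout) (μ : Microarch) (u₀ : State) : Prop :=
  ∀ (g : Ghost) (i : Nat) (A5 : Arena) (A : Arena × List Obj) (mc : Int) (n : Nat) (v : State),
    BodyF5 u₀ g i A5 A mc n v → ReachVia Lay μ WayInv v (fun w => AtF5b u₀ g i A5 A mc (min n 16) w)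

/-- Segment F5b (0x1155d4 – 0x1155f3): `floor1_multiplier = get_bits(f, 2) + 1` (checked byte store 0x1155e4), `call get_bits(f, 4)`,
exit at its return `cut217`. -/
def SegF5b (Lay : Layout) (μ : Microarch) (u₀ : State) : Prop :=
  ∀ (g : Ghost) (i : Nat) (A5 : Arena) (A : Arena × List Obj) (mc : Int) (n : Nat) (v : State),
    AtF5b u₀ g i A5 A mc n v → ReachVia Lay μ WayInv v (fun w => AtF5c u₀ g i A5 A mc n w)

/-- Segment F5c (0x1155f8 – 0x11565f): `rangebits`, `Xlist[0] = 0`, `Xlist[1] = 1 << rangebits`, `values = 2` (four checked stores),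
`j = 0`; exit at the head of loop 4007 with `P` = the `partitions` of the entry state. -/
def SegF5c (Lay : Layout) (μ : Microarch) (u₀ : State) : Prop :=
  ∀ (g : Ghost) (i : Nat) (A5 : Arena) (A : Arena × List Obj) (mc : Int) (n : Nat) (v : State),
    AtF5c u₀ g i A5 A mc n v →
      ReachVia Lay μ WayInv v (fun w => F5Outer u₀ g i A5 A mc n (Floor1.partitions v.mem (floorAt g v.mem i)) 0 w)

/-- Segment F5d (0x1156e6 – 0x115712): the test of loop 4007. `j ≥ partitions`: the segment's exit `AtF6` (FL7, FL8, XL). Else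
`c = pcl[j]` (checked load 0x115703) spilled to `[R+38H]`, `k = 0`, exit at the head of loop 4009 with `c`, `d` = the values of the
entry state. -/
def SegF5d (Lay : Layout) (μ : Microarch) (u₀ : State) : Prop :=
  ∀ (g : Ghost) (i : Nat) (A5 : Arena) (A : Arena × List Obj) (mc : Int) (n P j : Nat) (v : State),
    F5Outer u₀ g i A5 A mc n P j v →
      ReachVia Lay μ WayInv v (fun w => AtF6 u₀ g i w ∨
        F5Inner u₀ g i A5 A mc n P j (Floor1.partition_class_list v.mem (floorAt g v.mem i) j)
          (Floor1.class_dimensions v.mem (floorAt g v.mem i) (Floor1.partition_class_list v.mem (floorAt g v.mem i) j)) 0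
          Vorbis.L.start_decoder.cut219 w)

/-- Segment F5e (0x1156c8 – 0x1156e2 and 0x115664 – 0x11567a): the test of loop 4009 (checked load 0x1156d7 of
`class_dimensions[c]`). `k ≥ d`: `++j`, exit at the head of loop 4007. Else `get_bits(f, rangebits)` (checked load 0x115670), exit at
its return `cut218`. -/
def SegF5e (Lay : Layout) (μ : Microarch) (u₀ : State) : Prop :=
  ∀ (g : Ghost) (i : Nat) (A5 : Arena) (A : Arena × List Obj) (mc : Int) (n P j c d k : Nat) (v : State),
    F5Inner u₀ g i A5 A mc n P j c d k Vorbis.L.start_decoder.cut219 v →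
      ReachVia Lay μ WayInv v (fun w => F5Outer u₀ g i A5 A mc n P (j + 1) w ∨ F5After u₀ g i A5 A mc n P j c d k w)

/-- Segment F5f (0x11567f – 0x1156c4): the result spilled to `[R+30H]`, `Xlist[values] = (uint16) result` (checked word store
0x1156b3; `values ≤ 249`), `++values` (store 0x1156bd under the checked load 0x11568f), `++k`; exit at the head of loop 4009. -/
def SegF5f (Lay : Layout) (μ : Microarch) (u₀ : State) : Prop :=
  ∀ (g : Ghost) (i : Nat) (A5 : Arena) (A : Arena × List Obj) (mc : Int) (n P j c d k : Nat) (v : State),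
    F5After u₀ g i A5 A mc n P j c d k v →
      ReachVia Lay μ WayInv v (fun w => F5Inner u₀ g i A5 A mc n P j c d (k + 1) Vorbis.L.start_decoder.cut219 w)

/-! ### The composition -/

namespace F5

/-- The measure of loop 4007 (`P − j`, `j` read from r13). -/
def outerMeasure (P : Nat) (v : State) : Nat := P - (v.reg .r13).toNat

/-- The measure of loop 4009 (`d − k`, `k` read from r15). -/
def innerMeasure (d : Nat) (v : State) : Nat := d - (v.reg .r15).toNat

/-- `r13 = addr j` as a number (`j ≤ P ≤ 31`). -/
theorem r13_toNat {v : State} {j : Nat} (h : v.reg .r13 = addr j) (hj : j < 2 ^ 64) : (v.reg .r13).toNat = j := by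
  rw [h]
  exact toNat_addr j hj

/-- `r15 = addr k` as a number (`k ≤ d ≤ 8`). -/
theorem r15_toNat {v : State} {k : Nat} (h : v.reg .r15 = addr k) (hk : k < 2 ^ 64) : (v.reg .r15).toNat = k := by
  rw [h]
  exact toNat_addr k hk

end F5

/-- **Loop 4009 from its head**: the pieces F5e, F5f give, from `F5Inner … k` at `cut219`, the head of loop 4007 with `j + 1`.
`ReachVia.loop` with the measure `d − k`. -/
theorem F5Inner.run {Lay : Layout} {μ : Microarch} {u₀ : State} (he : SegF5e Lay μ u₀) (hf : SegF5f Lay μ u₀)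
    (g : Ghost) (i : Nat) (A5 : Arena) (A : Arena × List Obj) (mc : Int) (n P j c d : Nat) :
    ∀ v, (∃ k, F5Inner u₀ g i A5 A mc n P j c d k Vorbis.L.start_decoder.cut219 v) →
      ReachVia Lay μ WayInv v (fun w => F5Outer u₀ g i A5 A mc n P (j + 1) w) := by
  refine ReachVia.loop (F5.innerMeasure d) ?_
  intro v hv
  obtain ⟨k, hin⟩ := hv
  refine (he g i A5 A mc n P j c d k v hin).trans ?_
  intro w hw
  rcases hw with hout | haft
  · exact ReachVia.done (Or.inl hout)
  · refine (hf g i A5 A mc n P j c d k w haft).trans ?_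
    intro w' hw'
    refine ReachVia.done (Or.inr ⟨⟨k + 1, hw'⟩, ?_⟩)
    have hd := hin.d_le
    have hk := haft.k_lt
    have e1 : (v.reg .r15).toNat = k := F5.r15_toNat hin.r15 (by omega)
    have e2 : (w'.reg .r15).toNat = k + 1 := F5.r15_toNat hw'.r15 (by omega)
    unfold F5.innerMeasure
    rw [e1, e2]
    omega

/-- **THE COMPOSITION of the split of segment F5**: a → b → c by `ReachVia.trans`, then loop 4007 by `ReachVia.loop` with the
measure `P − j` (its body: F5d, then loop 4009 = `F5Inner.run`). Pure logic: no machine step. -/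
theorem SegF5.of_parts {Lay : Layout} {μ : Microarch} {u₀ : State}
    (ha : SegF5a Lay μ u₀) (hb : SegF5b Lay μ u₀) (hc : SegF5c Lay μ u₀) (hd : SegF5d Lay μ u₀) (he : SegF5e Lay μ u₀)
    (hf : SegF5f Lay μ u₀) : SegF5 Lay μ u₀ := by
  intro g i v hv
  obtain ⟨A5, A, mc, n, hbody⟩ := hv
  refine (ha g i A5 A mc n v hbody).trans ?_
  intro v1 h1
  refine (hb g i A5 A mc (min n 16) v1 h1).trans ?_
  intro v2 h2
  refine (hc g i A5 A mc (min n 16) v2 h2).trans ?_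
  intro v3 h3
  -- loop 4007, `P` fixed
  have hloop : ∀ s, (∃ j, F5Outer u₀ g i A5 A mc (min n 16) (Floor1.partitions v2.mem (floorAt g v2.mem i)) j s) →
      ReachVia Lay μ WayInv s (fun w => AtF6 u₀ g i w) := by
    refine ReachVia.loop (F5.outerMeasure (Floor1.partitions v2.mem (floorAt g v2.mem i))) ?_
    intro s hs
    obtain ⟨j, hout⟩ := hs
    refine (hd g i A5 A mc (min n 16) _ j s hout).trans ?_
    intro w hw
    rcases hw with h6 | hin
    · exact ReachVia.done (Or.inl h6)
    · refine (F5Inner.run he hf g i A5 A mc (min n 16) _ j _ _ w ⟨0, hin⟩).trans ?_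
      intro w' hw'
      refine ReachVia.done (Or.inr ⟨⟨j + 1, hw'⟩, ?_⟩)
      have hP : Floor1.partitions v2.mem (floorAt g v2.mem i) ≤ 31 := by
        rw [← hout.part.parts]
        exact hout.part.in5.cur.base.FL4
      have hj := hw'.j_le
      have e1 : (s.reg .r13).toNat = j := F5.r13_toNat hout.part.r13 (by omega)
      have e2 : (w'.reg .r13).toNat = j + 1 := F5.r13_toNat hw'.part.r13 (by omega)
      unfold F5.outerMeasure
      rw [e1, e2]
      omega
  exact hloop v3 ⟨0, h3⟩

end Vorbis.Spec.StartDecoder
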